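-- pv_equiv track=rewrite | github.com/le-ar/agentiux-plugins | plugins/agentiux-dev/scripts/agentiux_dev_lib.py | _available_upgrade_playbooks
-- ===== SOURCE A (Python) =====
-- def _available_upgrade_playbooks(selected_profiles: list[str]) -> list[str]:
--     playbooks = ["workstream-task-readiness", "docs-sync"]
--     if "local-infra" in selected_profiles or "backend-platform" in selected_profiles:
--         playbooks.append("dockerize-local-infra")
--     if "deterministic-verification" in selected_profiles:
--         playbooks.append("deterministic-verification")
--     if any(profile in selected_profiles for profile in {"web-platform", "mobile-platform"}):
--         playbooks.append("design-hooks")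
--     if "plugin-platform" in selected_profiles:
--         playbooks.append("plugin-platform-hardening")
--     return playbooks
-- ===== SOURCE B (Python) =====
-- # Inverted approach: one pass over the selected profiles through a
-- # profile->playbook index collects the triggered playbooks as a set,
-- # then the canonical order list is filtered against it.
-- _TRIGGERS = {
--     "local-infra": "dockerize-local-infra",
--     "backend-platform": "dockerize-local-infra",
--     "deterministic-verification": "deterministic-verification",
--     "web-platform": "design-hooks",
--     "mobile-platform": "design-hooks",
--     "plugin-platform": "plugin-platform-hardening",
-- }
--
-- _ORDER = [
--     "dockerize-local-infra",
--     "deterministic-verification",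
--     "design-hooks",
--     "plugin-platform-hardening",
-- ]
--
--
-- def _available_upgrade_playbooks(selected_profiles: list[str]) -> list[str]:
--     triggered = {_TRIGGERS[p] for p in selected_profiles if p in _TRIGGERS}
--     return ["workstream-task-readiness", "docs-sync"] + [
--         pb for pb in _ORDER if pb in triggered
--     ]
-- ===== Notes on version B (the rewrite author's own statement) =====
-- stated objective: alternative
-- what changed: Inverts the traversal: instead of testing each rule's profiles against the list, B makes one pass over selected_profiles through a profile-to-playbook index collecting a set of triggered playbooks, then filters the canonical playbook order against that set.
import Mathlib
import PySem

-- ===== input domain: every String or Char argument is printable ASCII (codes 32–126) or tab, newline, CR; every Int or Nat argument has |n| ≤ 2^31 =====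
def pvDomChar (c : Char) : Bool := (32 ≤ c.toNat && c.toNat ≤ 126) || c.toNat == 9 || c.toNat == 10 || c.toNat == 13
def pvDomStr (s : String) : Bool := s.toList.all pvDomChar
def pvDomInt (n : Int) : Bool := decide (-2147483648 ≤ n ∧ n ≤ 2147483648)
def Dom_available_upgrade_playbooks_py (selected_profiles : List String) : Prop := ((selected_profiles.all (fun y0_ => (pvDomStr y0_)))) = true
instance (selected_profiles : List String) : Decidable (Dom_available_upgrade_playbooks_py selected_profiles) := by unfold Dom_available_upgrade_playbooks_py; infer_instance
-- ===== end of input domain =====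

-- B inverts the traversal: one pass over selected_profiles through a profile->playbook index collects a set
-- of triggered playbooks, then the canonical playbook order is filtered against it (alternative; same result).
-- ===== PORT A =====
def available_upgrade_playbooks_py (selected_profiles : List String) : List String :=
  let playbooks := ["workstream-task-readiness", "docs-sync"]
  let playbooks := if selected_profiles.contains "local-infra" || selected_profiles.contains "backend-platform" then playbooks ++ ["dockerize-local-infra"] else playbooks
  let playbooks := if selected_profiles.contains "deterministic-verification" then playbooks ++ ["deterministic-verification"] else playbooks
  -- 'any(profile in selected_profiles for profile in {...})': set of two distinct literals, boolean result is iteration-order independent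
  let playbooks := if (["web-platform", "mobile-platform"].any (fun p => selected_profiles.contains p)) then playbooks ++ ["design-hooks"] else playbooks
  let playbooks := if selected_profiles.contains "plugin-platform" then playbooks ++ ["plugin-platform-hardening"] else playbooks
  playbooks

-- ===== PORT B =====
def pvTriggers : PySem.Dict String String := PySem.Dict.mk
  [ ("local-infra", "dockerize-local-infra"),
    ("backend-platform", "dockerize-local-infra"),
    ("deterministic-verification", "deterministic-verification"),
    ("web-platform", "design-hooks"),
    ("mobile-platform", "design-hooks"),
    ("plugin-platform", "plugin-platform-hardening") ]

def pvOrder : List String :=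
  ["dockerize-local-infra", "deterministic-verification", "design-hooks", "plugin-platform-hardening"]

-- the set comprehension '{_TRIGGERS[p] for p in selected_profiles if p in _TRIGGERS}' as a fold building a PySem.Set
def available_upgrade_playbooks_py_alt (selected_profiles : List String) : List String :=
  let triggered : PySem.Set String :=
    selected_profiles.foldl
      (fun acc p => match PySem.Dict.get? pvTriggers p with
        | some pb => PySem.Set.add acc pb
        | none => acc)
      PySem.Set.empty
  ["workstream-task-readiness", "docs-sync"] ++ pvOrder.filter (fun pb => PySem.Set.contains triggered pb)

-- ===== PRECONDITION & SPEC =====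
def Spec_available_upgrade_playbooks_py (selected_profiles : List String) (out : List String) : Prop := out = available_upgrade_playbooks_py_alt selected_profiles
instance (selected_profiles : List String) (out : List String) : Decidable (Spec_available_upgrade_playbooks_py selected_profiles out) := by unfold Spec_available_upgrade_playbooks_py; infer_instance

-- ===== CLAIM (what is proved, stated in full; the proofs are below) =====
def Claim_equal_available_upgrade_playbooks_py : Prop := ∀ (selected_profiles : List String), Dom_available_upgrade_playbooks_py selected_profiles → Spec_available_upgrade_playbooks_py selected_profiles (available_upgrade_playbooks_py selected_profiles)

-- ===== LEMMAS AND PROOFS =====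

-- membership in the folded 'triggered' set ⇔ some selected profile maps to that playbook
theorem pv_trig_contains (sp : List String) (acc : PySem.Set String) (v : String) :
    PySem.Set.contains
      (sp.foldl (fun acc p => match PySem.Dict.get? pvTriggers p with
        | some pb => PySem.Set.add acc pb
        | none => acc) acc) v
    = (PySem.Set.contains acc v || sp.any (fun p => PySem.Dict.get? pvTriggers p == some v)) := by
  induction sp generalizing acc with
  | nil => simp
  | cons p rest ih =>
    simp only [List.foldl_cons, List.any_cons, ih]
    cases h : PySem.Dict.get? pvTriggers p with
    | none => simp
    | some pb =>
      simp only
      by_cases hv : pb = v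
      · subst hv
        simp [PySem.Set.add, PySem.Set.contains]
        split_ifs with hc <;> simp [hc]
      · have hne : (some pb == some v) = false := by simp [hv]
        have hck : PySem.Set.contains (PySem.Set.add acc pb) v = PySem.Set.contains acc v := by
          simp only [PySem.Set.add, PySem.Set.contains]
          split_ifs with hc
          · rfl
          · simp [List.mem_append, Ne.symm hv]
        rw [hck, hne]
        simp

set_option maxRecDepth 8192 in
theorem pv_get1 (p : String) :
    (PySem.Dict.get? pvTriggers p == some "dockerize-local-infra")
    = (p == "local-infra" || p == "backend-platform") := by
  simp only [pvTriggers, PySem.Dict.get?, List.find?_cons]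
  cases e1 : ("local-infra" == p) <;> cases e2 : ("backend-platform" == p) <;>
  cases e3 : ("deterministic-verification" == p) <;> cases e4 : ("web-platform" == p) <;>
  cases e5 : ("mobile-platform" == p) <;> cases e6 : ("plugin-platform" == p) <;>
  simp_all [beq_iff_eq, eq_comm (b := p)]

set_option maxRecDepth 8192 in
theorem pv_get2 (p : String) :
    (PySem.Dict.get? pvTriggers p == some "deterministic-verification")
    = (p == "deterministic-verification") := by
  simp only [pvTriggers, PySem.Dict.get?, List.find?_cons]
  cases e1 : ("local-infra" == p) <;> cases e2 : ("backend-platform" == p) <;>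
  cases e3 : ("deterministic-verification" == p) <;> cases e4 : ("web-platform" == p) <;>
  cases e5 : ("mobile-platform" == p) <;> cases e6 : ("plugin-platform" == p) <;>
  simp_all [beq_iff_eq, eq_comm (b := p)]

set_option maxRecDepth 8192 in
theorem pv_get3 (p : String) :
    (PySem.Dict.get? pvTriggers p == some "design-hooks")
    = (p == "web-platform" || p == "mobile-platform") := by
  simp only [pvTriggers, PySem.Dict.get?, List.find?_cons]
  cases e1 : ("local-infra" == p) <;> cases e2 : ("backend-platform" == p) <;>
  cases e3 : ("deterministic-verification" == p) <;> cases e4 : ("web-platform" == p) <;>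
  cases e5 : ("mobile-platform" == p) <;> cases e6 : ("plugin-platform" == p) <;>
  simp_all [beq_iff_eq, eq_comm (b := p)]

set_option maxRecDepth 8192 in
theorem pv_get4 (p : String) :
    (PySem.Dict.get? pvTriggers p == some "plugin-platform-hardening")
    = (p == "plugin-platform") := by
  simp only [pvTriggers, PySem.Dict.get?, List.find?_cons]
  cases e1 : ("local-infra" == p) <;> cases e2 : ("backend-platform" == p) <;>
  cases e3 : ("deterministic-verification" == p) <;> cases e4 : ("web-platform" == p) <;>
  cases e5 : ("mobile-platform" == p) <;> cases e6 : ("plugin-platform" == p) <;>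
  simp_all [beq_iff_eq, eq_comm (b := p)]

theorem pv_any_or (sp : List String) (a b : String) :
    sp.any (fun p => p == a || p == b) = (sp.contains a || sp.contains b) := by
  induction sp with
  | nil => simp
  | cons p rest ih =>
    simp only [List.any_cons, List.contains_cons, ih]
    rw [show (p == a) = (a == p) from BEq.comm, show (p == b) = (b == p) from BEq.comm]
    cases (a == p) <;> cases (b == p) <;> simp [Bool.or_left_comm]

theorem pv_any_one (sp : List String) (a : String) :
    sp.any (fun p => p == a) = sp.contains a := by
  induction sp with
  | nil => simp
  | cons p rest ih =>
    simp only [List.any_cons, List.contains_cons, ih]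
    rw [show (p == a) = (a == p) from BEq.comm]

-- ===== VERDICT (by name: the statement is the Claim_ definition above) =====
theorem available_upgrade_playbooks_py_spec : Claim_equal_available_upgrade_playbooks_py := by
  intro sp _
  unfold Spec_available_upgrade_playbooks_py available_upgrade_playbooks_py available_upgrade_playbooks_py_alt
  simp only [pvOrder, List.filter, pv_trig_contains]
  simp only [pv_get1, pv_get2, pv_get3, pv_get4, pv_any_or, pv_any_one, PySem.Set.empty,
    PySem.Set.contains, List.contains_nil, Bool.false_or]
  by_cases h1 : ("local-infra" : String) ∈ sp <;>
  by_cases h2 : ("backend-platform" : String) ∈ sp <;>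
  by_cases h3 : ("deterministic-verification" : String) ∈ sp <;>
  by_cases h4 : ("web-platform" : String) ∈ sp <;>
  by_cases h5 : ("mobile-platform" : String) ∈ sp <;>
  by_cases h6 : ("plugin-platform" : String) ∈ sp <;>
  simp [h1, h2, h3, h4, h5, h6]
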